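-- pv_equiv track=rewrite | github.com/wzjoriv/stubpy | stubpy/generator.py | _join_sections
-- ===== SOURCE A (Python) =====
-- def _join_sections(tagged: list[tuple[str, bool]]) -> str:
--     """Join stub sections with smart spacing based on symbol kind.
--
--     Consecutive *variable* or *alias* stubs are joined with a single newline
--     so they form a compact block — no blank line between ``X: int`` and
--     ``Y: str``, or between ``Color: TypeAlias = ...`` and
--     ``Length: TypeAlias = ...``.  All other transitions use a double newline.
--
--     Parameters
--     ----------
--     tagged : list of (stub_text, is_compact) pairs
--         ``is_compact`` is ``True`` for variable and single-line alias stubs.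
--
--     Returns
--     -------
--     str
--         The assembled stub body.
--
--     Examples
--     --------
--     >>> _join_sections([("X: int", True), ("Y: str", True), ("def f(): ...", False)])
--     'X: int\\nY: str\\n\\ndef f(): ...'
--     """
--     if not tagged:
--         return ""
--     parts = [tagged[0][0]]
--     for (_, prev_compact), (text, curr_compact) in zip(tagged, tagged[1:]):
--         sep = "\n" if (prev_compact and curr_compact) else "\n\n"
--         parts.append(sep + text)
--     return "".join(parts)
-- ===== SOURCE B (Python) =====
-- from itertools import groupby
--
--
-- def _join_sections(tagged: list[tuple[str, bool]]) -> str: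
--     """Group the sections into maximal runs sharing the same compact flag,
--     join each run internally with its own separator, then join the runs."""
--     blocks = []
--     for compact, group in groupby(tagged, key=lambda item: item[1]):
--         sep = "\n" if compact else "\n\n"
--         blocks.append(sep.join(text for text, _ in group))
--     return "\n\n".join(blocks)
-- ===== Notes on version B (the rewrite author's own statement) =====
-- stated objective: idiomatic
-- what changed: Replaces the pairwise zip-over-adjacent-pairs loop that prefixes each section with a separator by an itertools.groupby decomposition: maximal runs of equal compact flags are each joined with their run's separator and the resulting blocks are joined with a blank line.
import Mathlib
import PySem

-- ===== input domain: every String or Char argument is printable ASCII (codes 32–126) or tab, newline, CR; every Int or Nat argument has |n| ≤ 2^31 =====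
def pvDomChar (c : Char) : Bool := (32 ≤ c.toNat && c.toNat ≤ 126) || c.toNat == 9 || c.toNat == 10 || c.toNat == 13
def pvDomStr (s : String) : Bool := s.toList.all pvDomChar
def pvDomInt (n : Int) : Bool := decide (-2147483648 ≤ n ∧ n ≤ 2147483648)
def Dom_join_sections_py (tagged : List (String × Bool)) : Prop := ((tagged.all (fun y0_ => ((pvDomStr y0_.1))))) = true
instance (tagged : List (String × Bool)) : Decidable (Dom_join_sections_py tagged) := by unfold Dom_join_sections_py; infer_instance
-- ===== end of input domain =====

-- B joins maximal runs of equal compact flags (the groupby decomposition) instead of A's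
-- pairwise separator loop; same cost, more idiomatic. Equivalence is proved on all inputs.

-- ===== PORT A =====
def join_sections_py (tagged : List (String × Bool)) : String :=
  match tagged with
  | [] => ""
  | (t0, _) :: _ =>
    -- parts = [tagged[0][0]]; for (_,pc),(t,cc) in zip(tagged, tagged[1:]): parts.append(sep + t)
    let parts := (List.zip tagged (PySem.List.slice tagged (some 1) none)).foldl
      (fun acc pr => acc ++ [(if pr.1.2 && pr.2.2 then "\n" else "\n\n") ++ pr.2.1]) [t0]
    PySem.Str.join "" parts

-- ===== PORT B =====
-- itertools.groupby(tagged, key=item[1]): the maximal runs of equal flags, each as (flag, texts)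
def pvRuns : List (String × Bool) → List (Bool × List String)
  | [] => []
  | (t, c) :: rest =>
    match pvRuns rest with
    | (c', ts) :: gs => if c == c' then (c, t :: ts) :: gs else (c, [t]) :: (c', ts) :: gs
    | [] => [(c, [t])]

def join_sections_py_alt (tagged : List (String × Bool)) : String :=
  PySem.Str.join "\n\n"
    ((pvRuns tagged).map (fun g => PySem.Str.join (if g.1 then "\n" else "\n\n") g.2))

-- ===== PRECONDITION & SPEC =====
def Spec_join_sections_py (tagged : List (String × Bool)) (out : String) : Prop := out = join_sections_py_alt tagged
instance (tagged : List (String × Bool)) (out : String) : Decidable (Spec_join_sections_py tagged out) := by unfold Spec_join_sections_py; infer_instance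

-- ===== CLAIM (what is proved, stated in full; the proofs are below) =====
def Claim_equal_join_sections_py : Prop := ∀ (tagged : List (String × Bool)), Dom_join_sections_py tagged → Spec_join_sections_py tagged (join_sections_py tagged)

-- ===== LEMMAS AND PROOFS =====

-- the run containing the head of a nonempty list starts with that head and carries its flag
theorem pvRuns_cons (t : String) (c : Bool) (rest : List (String × Bool)) :
    ∃ ts gs, pvRuns ((t, c) :: rest) = (c, t :: ts) :: gs := by
  cases h : pvRuns rest with
  | nil => exact ⟨[], [], by simp [pvRuns, h]⟩
  | cons g gs =>
    obtain ⟨c', ts⟩ := g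
    by_cases hc : c = c'
    · exact ⟨ts, gs, by simp [pvRuns, h, hc]⟩
    · exact ⟨[], (c', ts) :: gs, by simp [pvRuns, h, hc]⟩

-- PySem.Chars.join with the empty separator is flatten
theorem joinNil (l : List (List Char)) : PySem.Chars.join [] l = l.flatten := by
  induction l with
  | nil => simp [PySem.Chars.join_nil]
  | cons a l ih =>
    cases l with
    | nil => simp [PySem.Chars.join_singleton]
    | cons b l' => simp [PySem.Chars.join_cons_cons, ih]

-- B peels its first section off with the pairwise separator, character-wise
theorem B_cons_cons (t1 : String) (c1 : Bool) (t2 : String) (c2 : Bool)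
    (r : List (String × Bool)) :
    (join_sections_py_alt ((t1, c1) :: (t2, c2) :: r)).toList =
      t1.toList ++ (if c1 && c2 then "\n" else "\n\n").toList
        ++ (join_sections_py_alt ((t2, c2) :: r)).toList := by
  obtain ⟨ts, gs, h⟩ := pvRuns_cons t2 c2 r
  have h2 : pvRuns ((t1, c1) :: (t2, c2) :: r) =
      if c1 == c2 then (c1, t1 :: t2 :: ts) :: gs
      else (c1, [t1]) :: (c2, t2 :: ts) :: gs := by
    rw [pvRuns, h]
  by_cases hc : c1 = c2
  · subst hc
    simp only [beq_self_eq_true, if_pos] at h2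
    cases gs with
    | nil =>
      rw [join_sections_py_alt, join_sections_py_alt, h2, h]
      cases c1 <;>
        simp [PySem.Str.toList_join, PySem.Chars.join_singleton,
          PySem.Chars.join_cons_cons]
    | cons g gs' =>
      rw [join_sections_py_alt, join_sections_py_alt, h2, h]
      cases c1 <;>
        simp [PySem.Str.toList_join, PySem.Chars.join_cons_cons]
  · simp only [beq_iff_eq, hc, if_false] at h2
    rw [join_sections_py_alt, join_sections_py_alt, h2, h]
    have hsep : (if c1 && c2 then "\n" else "\n\n") = "\n\n" := by
      cases c1 <;> cases c2 <;> simp_all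
    rw [hsep]
    simp [PySem.Str.toList_join, PySem.Chars.join_cons_cons,
      PySem.Chars.join_singleton]

-- A peels its first section off with the pairwise separator, character-wise
theorem A_cons_cons (t1 : String) (c1 : Bool) (t2 : String) (c2 : Bool)
    (r : List (String × Bool)) :
    (join_sections_py ((t1, c1) :: (t2, c2) :: r)).toList =
      t1.toList ++ (if c1 && c2 then "\n" else "\n\n").toList
        ++ (join_sections_py ((t2, c2) :: r)).toList := by
  simp [join_sections_py, PySem.List.slice_from_one, PySem.Str.toList_join,
    joinNil, String.toList_append, List.zip]

theorem charsEq (tagged : List (String × Bool)) :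
    (join_sections_py tagged).toList = (join_sections_py_alt tagged).toList := by
  induction tagged with
  | nil =>
    simp [join_sections_py, join_sections_py_alt, pvRuns, PySem.Str.toList_join,
      PySem.Chars.join_nil]
  | cons hd tl ih =>
    obtain ⟨t1, c1⟩ := hd
    cases tl with
    | nil =>
      simp [join_sections_py, join_sections_py_alt, pvRuns, PySem.List.slice_from_one,
        PySem.Str.toList_join, PySem.Chars.join_singleton]
    | cons hd2 tl2 =>
      obtain ⟨t2, c2⟩ := hd2
      rw [A_cons_cons, B_cons_cons, ih]

-- ===== VERDICT (by name: the statement is the Claim_ definition above) =====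
theorem join_sections_py_spec : Claim_equal_join_sections_py := by
  intro tagged _
  unfold Spec_join_sections_py
  exact String.toList_inj.mp (charsEq tagged)
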